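-- pv_equiv track=rewrite | github.com/616xold/rehab_budd_islem | deploy/utils.py | sanitize_for_speech
-- ===== SOURCE A (Python) =====
-- def sanitize_for_speech(text: str) -> str:
--     """
--     Sanitize text for better speech output.
--
--     Args:
--         text (str): Input text
--
--     Returns:
--         str: Sanitized text
--     """
--     # Replace symbols that might not be spoken well
--     replacements = {
--         "&": " and ",
--         "%": " percent ",
--         "/": " or ",
--         "-": " ",
--         "_": " ",
--         "+": " plus ",
--         "=": " equals ",
--         "#": " number ",
--         "@": " at "
--     }
--
--     for symbol, replacement in replacements.items():
--         text = text.replace(symbol, replacement)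
--
--     # Remove extra whitespace
--     text = " ".join(text.split())
--
--     return text
-- ===== SOURCE B (Python) =====
-- def sanitize_for_speech(text: str) -> str:
--     """
--     Sanitize text for better speech output (single-pass table-driven version).
--     """
--     replacements = {
--         "&": " and ",
--         "%": " percent ",
--         "/": " or ",
--         "-": " ",
--         "_": " ",
--         "+": " plus ",
--         "=": " equals ",
--         "#": " number ",
--         "@": " at "
--     }
--     out = []
--     for ch in text:
--         out.append(replacements.get(ch, ch))
--     return " ".join("".join(out).split())
-- ===== Notes on version B (the rewrite author's own statement) =====
-- stated objective: alternative
-- what changed: B replaces A's nine sequential full-string .replace passes with a single table-driven per-character traversal that appends each character's mapped replacement into a list joined once, followed by the same whitespace normalization.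
import Mathlib
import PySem

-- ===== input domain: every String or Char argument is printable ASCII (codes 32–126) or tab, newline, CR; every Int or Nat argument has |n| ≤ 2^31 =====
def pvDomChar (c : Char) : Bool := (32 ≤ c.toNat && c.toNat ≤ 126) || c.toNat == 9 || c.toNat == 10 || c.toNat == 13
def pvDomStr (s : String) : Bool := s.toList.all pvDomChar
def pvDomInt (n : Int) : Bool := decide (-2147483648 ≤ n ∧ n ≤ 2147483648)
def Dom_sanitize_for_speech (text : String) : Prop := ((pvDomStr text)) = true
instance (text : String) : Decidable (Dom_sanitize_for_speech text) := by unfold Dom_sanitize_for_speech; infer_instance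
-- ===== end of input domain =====

-- B replaces A's nine sequential .replace passes by one table-driven per-character pass (objective: alternative).

-- ===== PORT A =====
def sanitize_for_speech (text : String) : String :=
  let t1 := PySem.Str.replace text "&" " and "
  let t2 := PySem.Str.replace t1 "%" " percent "
  let t3 := PySem.Str.replace t2 "/" " or "
  let t4 := PySem.Str.replace t3 "-" " "
  let t5 := PySem.Str.replace t4 "_" " "
  let t6 := PySem.Str.replace t5 "+" " plus "
  let t7 := PySem.Str.replace t6 "=" " equals "
  let t8 := PySem.Str.replace t7 "#" " number "
  let t9 := PySem.Str.replace t8 "@" " at "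
  PySem.Str.join " " (PySem.Str.split₀ t9)

-- ===== PORT B =====
def pvRepl : PySem.Dict Char String :=
  PySem.Dict.ofList
    [('&', " and "), ('%', " percent "), ('/', " or "), ('-', " "), ('_', " "),
     ('+', " plus "), ('=', " equals "), ('#', " number "), ('@', " at ")]

def sanitize_for_speech_alt (text : String) : String :=
  let out : List String :=
    text.toList.foldl (fun acc ch => acc ++ [pvRepl.getD ch (String.ofList [ch])]) []
  PySem.Str.join " " (PySem.Str.split₀ (PySem.Str.join "" out))

-- ===== PRECONDITION & SPEC =====
def Spec_sanitize_for_speech (text : String) (out : String) : Prop := out = sanitize_for_speech_alt text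
instance (text : String) (out : String) : Decidable (Spec_sanitize_for_speech text out) := by unfold Spec_sanitize_for_speech; infer_instance

-- ===== CLAIM (what is proved, stated in full; the proofs are below) =====
def Claim_equal_sanitize_for_speech : Prop := ∀ (text : String), Dom_sanitize_for_speech text → Spec_sanitize_for_speech text (sanitize_for_speech text)

-- ===== LEMMAS AND PROOFS =====

-- single-character pattern: Chars.replace is a flatMap over the characters
theorem pv_go_single (c : Char) (new : List Char) :
    ∀ (fuel : Nat) (l acc : List Char), l.length ≤ fuel →
      PySem.Chars.replace.go [c] new fuel l acc =
        acc.reverse ++ l.flatMap (fun x => if x = c then new else [x]) := by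
  intro fuel
  induction fuel with
  | zero =>
    intro l acc h
    cases l with
    | nil => rw [PySem.Chars.replace.go.eq_def]; simp
    | cons x t => simp at h
  | succ n ih =>
    intro l acc h
    cases l with
    | nil => rw [PySem.Chars.replace.go.eq_def]; simp
    | cons x t =>
      rw [PySem.Chars.replace.go.eq_def]
      simp only [List.isPrefixOf, Bool.and_true, List.length_cons] at *
      by_cases hx : c = x
      · subst hx
        simp only [beq_self_eq_true, if_true, List.drop_succ_cons, List.length_nil,
          List.drop_zero]
        rw [ih t (new.reverse ++ acc) (by omega)]
        simp [List.flatMap_cons]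
      · have : (c == x) = false := by simp [hx]
        rw [this]
        simp only [Bool.false_eq_true, if_false]
        rw [ih t (x :: acc) (by omega)]
        have hxc : ¬ (x = c) := fun hh => hx hh.symm
        simp [List.flatMap_cons, hxc]

theorem pv_replace_single (s : List Char) (c : Char) (new : List Char) :
    PySem.Chars.replace s [c] new = s.flatMap (fun x => if x = c then new else [x]) := by
  rw [PySem.Chars.replace]
  simp only [List.isEmpty_cons, Bool.false_eq_true, if_false]
  rw [pv_go_single c new s.length s [] le_rfl]
  simp

-- B's accumulator loop is a map
theorem pv_foldl_map {α β : Type} (g : α → β) :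
    ∀ (l : List α) (acc : List β),
      l.foldl (fun acc ch => acc ++ [g ch]) acc = acc ++ l.map g := by
  intro l
  induction l with
  | nil => simp
  | cons x t ih => intro acc; simp [List.foldl_cons, ih]

theorem pv_join_nil (parts : List (List Char)) :
    PySem.Chars.join [] parts = parts.flatten := by
  rw [PySem.Chars.join]
  induction parts with
  | nil => simp [List.intercalate]
  | cons p t ih =>
    cases t with
    | nil => simp [List.intercalate]
    | cons q r =>
      simp only [List.intercalate] at *
      simp [List.intersperse, ih]

-- the composed per-character effect of A's nine replaces
def pvF (c : Char) : List Char :=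
  (if c = '&' then " and ".toList else [c]).flatMap (fun x =>
    (if x = '%' then " percent ".toList else [x]).flatMap (fun x =>
      (if x = '/' then " or ".toList else [x]).flatMap (fun x =>
        (if x = '-' then " ".toList else [x]).flatMap (fun x =>
          (if x = '_' then " ".toList else [x]).flatMap (fun x =>
            (if x = '+' then " plus ".toList else [x]).flatMap (fun x =>
              (if x = '=' then " equals ".toList else [x]).flatMap (fun x =>
                (if x = '#' then " number ".toList else [x]).flatMap (fun x =>
                  if x = '@' then " at ".toList else [x])))))))) 

theorem pv_F_eq (c : Char) : pvF c = (pvRepl.getD c (String.ofList [c])).toList := by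
  by_cases h1 : c = '&'; · subst h1; decide
  by_cases h2 : c = '%'; · subst h2; decide
  by_cases h3 : c = '/'; · subst h3; decide
  by_cases h4 : c = '-'; · subst h4; decide
  by_cases h5 : c = '_'; · subst h5; decide
  by_cases h6 : c = '+'; · subst h6; decide
  by_cases h7 : c = '='; · subst h7; decide
  by_cases h8 : c = '#'; · subst h8; decide
  by_cases h9 : c = '@'; · subst h9; decide
  simp [pvF, h1, h2, h3, h4, h5, h6, h7, h8, h9, pvRepl, PySem.Dict.ofList,
    PySem.Dict.getD, PySem.Dict.get?, PySem.Dict.update, PySem.Dict.insert,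
    PySem.Dict.empty, PySem.Dict.contains, Ne.symm h1, Ne.symm h2, Ne.symm h3,
    Ne.symm h4, Ne.symm h5, Ne.symm h6, Ne.symm h7, Ne.symm h8, Ne.symm h9]

theorem pv_core_eq (text : String) :
    (PySem.Str.replace (PySem.Str.replace (PySem.Str.replace (PySem.Str.replace
      (PySem.Str.replace (PySem.Str.replace (PySem.Str.replace (PySem.Str.replace
      (PySem.Str.replace text "&" " and ") "%" " percent ") "/" " or ") "-" " ")
      "_" " ") "+" " plus ") "=" " equals ") "#" " number ") "@" " at ") =
    PySem.Str.join ""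
      (text.toList.foldl (fun acc ch => acc ++ [pvRepl.getD ch (String.ofList [ch])]) []) := by
  rw [← String.toList_inj]
  rw [PySem.Str.toList_join, pv_foldl_map]
  simp only [List.nil_append, List.map_map]
  rw [show ("".toList) = ([] : List Char) from rfl, pv_join_nil, ← List.flatMap_def]
  simp only [PySem.Str.toList_replace,
    show "&".toList = ['&'] from rfl, show "%".toList = ['%'] from rfl,
    show "/".toList = ['/'] from rfl, show "-".toList = ['-'] from rfl,
    show "_".toList = ['_'] from rfl, show "+".toList = ['+'] from rfl,
    show "=".toList = ['='] from rfl, show "#".toList = ['#'] from rfl,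
    show "@".toList = ['@'] from rfl,
    pv_replace_single, List.flatMap_assoc]
  congr 1
  funext c
  exact pv_F_eq c

-- ===== VERDICT (by name: the statement is the Claim_ definition above) =====
theorem sanitize_for_speech_spec : Claim_equal_sanitize_for_speech := by
  intro text _
  show sanitize_for_speech text = sanitize_for_speech_alt text
  simp only [sanitize_for_speech, sanitize_for_speech_alt]
  rw [pv_core_eq]
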